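-- pv_equiv track=rewrite | github.com/Bimi1804/Decl.-ASAG | python_files/classes.py | __response_check
-- ===== SOURCE A (Python) =====
-- def __response_check(act_a,act_b,processed_answer):
--     """
--     Checks if the answer fulfills Response[A,B]
--
--     Parameters
--     ----------
--     act_a : str
--         The actual text (word) of activity A
--     act_b : str
--         The actual text (word) of activity B
--     processed_answer : str[0..*]
--         the list of processed words of the answer
--
--     Returns
--     -------
--     True -> If the answer fulfills the constraint
--     False -> If the answer does not fulfill the constraint
--     """
--     # True if A is not in processed_answer:
--     if act_a not in processed_answer:
--         return True
--     # False if A in answer but B not in answer: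
--     if act_a in processed_answer and act_b not in processed_answer:
--         return False
--     checking = processed_answer
--     while act_a in checking:
--         # False if A is in remaining answer but B is not:
--         if act_b not in checking:
--             return False
--         marker_a = checking.index(act_a)
--         # False if A is the last element:
--         if marker_a == len(checking)-1:
--             return False
--         if act_b not in checking[marker_a:]:
--             return False
--         checking = checking[marker_a+1:]
--     return True
-- ===== SOURCE B (Python) =====
-- def __response_check(act_a, act_b, processed_answer):
--     """Single backward scan: the answer satisfies Response[A,B] iff, reading
--     from the end, we meet a B before (or instead of) any A."""
--     for w in reversed(processed_answer):
--         if w == act_a: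
--             return False
--         if w == act_b:
--             return True
--     return True
-- ===== Notes on version B (the rewrite author's own statement) =====
-- stated objective: alternative
-- what changed: Replaced A's while-loop of repeated '.index'/membership tests and slice copies by a single backward scan that returns at the first element from the end equal to act_a (False) or act_b (True).
-- intended difference: When act_a == act_b and act_a occurs in the answer but not as its last element, A returns True (its 'act_b in checking[marker_a:]' test lets an A count as its own follower), while B returns False, the intended Response[A,B] reading that every A needs a B strictly later. — e.g. on __response_check("a", "a", ["a", "x"]): A returns true, B returns false
import Mathlib
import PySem

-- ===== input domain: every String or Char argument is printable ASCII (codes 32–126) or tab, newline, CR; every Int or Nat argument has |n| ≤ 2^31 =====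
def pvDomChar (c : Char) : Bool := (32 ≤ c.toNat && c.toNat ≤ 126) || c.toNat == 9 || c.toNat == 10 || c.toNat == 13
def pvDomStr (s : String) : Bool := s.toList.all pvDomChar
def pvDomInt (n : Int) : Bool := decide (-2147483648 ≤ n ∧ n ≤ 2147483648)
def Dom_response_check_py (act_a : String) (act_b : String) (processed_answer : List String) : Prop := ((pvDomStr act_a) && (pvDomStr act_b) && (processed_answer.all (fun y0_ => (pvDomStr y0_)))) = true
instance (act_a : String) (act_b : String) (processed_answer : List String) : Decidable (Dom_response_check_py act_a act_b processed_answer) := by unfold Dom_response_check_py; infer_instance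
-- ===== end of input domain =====

-- B replaces A's while-loop of index/membership/slice passes by a single backward scan
-- (the first occurrence from the end decides); intended difference: when act_a = act_b A
-- lets an A count as its own follower, B requires a strictly later B.


-- ===== PORT A =====
-- the 'while act_a in checking' loop of A, step for step (the 'none' arm of the
-- index? match is unreachable: the loop guard guarantees act_a ∈ checking)
def respLoopA (act_a act_b : String) (checking : List String) : Bool :=
  if checking.contains act_a then
    -- False if A is in remaining answer but B is not:
    if !checking.contains act_b then false
    else
      match hm : PySem.List.index? checking act_a with
      | none => false
      | some marker_a =>
        -- False if A is the last element:
        if marker_a = checking.length - 1 then false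
        else if !(PySem.List.slice checking (some (marker_a : Int)) none).contains act_b then false
        else respLoopA act_a act_b (PySem.List.slice checking (some ((marker_a : Int) + 1)) none)
  else true
termination_by checking.length
decreasing_by
  obtain ⟨hk, -, -⟩ := PySem.List.getElem_of_index?_eq_some hm
  rw [show ((marker_a : Int) + 1) = (((marker_a + 1 : Nat)) : Int) by push_cast; ring,
      PySem.List.slice_from_natCast]
  simp only [List.length_drop]
  omega

def response_check_py (act_a : String) (act_b : String) (processed_answer : List String) : Bool :=
  -- True if A is not in processed_answer:
  if !processed_answer.contains act_a then true
  -- False if A in answer but B not in answer: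
  else if processed_answer.contains act_a && !processed_answer.contains act_b then false
  else respLoopA act_a act_b processed_answer

-- ===== PORT B =====
-- Source B's backward scan: first element from the end equal to act_a ⇒ False,
-- equal to act_b ⇒ True; exhausted ⇒ True
def respScan (act_a act_b : String) : List String → Bool
  | [] => true
  | w :: ws => if w == act_a then false else if w == act_b then true else respScan act_a act_b ws

def response_check_py_alt (act_a : String) (act_b : String) (processed_answer : List String) : Bool :=
  respScan act_a act_b processed_answer.reverse

-- ===== PRECONDITION & SPEC =====
-- When act_a = act_b and act_a occurs but is not the last element, A returns true (its
-- containment test lets an occurrence of A count as its own follower B), while B returns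
-- false, the intended Response[A,B] reading that each A needs a B strictly later.
def D_response_check_py (act_a : String) (act_b : String) (processed_answer : List String) : Prop :=
  act_a = act_b ∧ act_a ∈ processed_answer ∧ processed_answer.getLast? ≠ some act_a
instance (act_a : String) (act_b : String) (processed_answer : List String) : Decidable (D_response_check_py act_a act_b processed_answer) := by unfold D_response_check_py; infer_instance

def Spec_response_check_py (act_a : String) (act_b : String) (processed_answer : List String) (out : Bool) : Prop := ¬ D_response_check_py act_a act_b processed_answer → out = response_check_py_alt act_a act_b processed_answer
instance (act_a : String) (act_b : String) (processed_answer : List String) (out : Bool) : Decidable (Spec_response_check_py act_a act_b processed_answer out) := by unfold Spec_response_check_py; infer_instance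

def pvDiffWitness_response_check_py : String × String × List String := ("a", "a", ["a", "x"])
def pvDiffWitnessOut_response_check_py : Bool × Bool := (true, false)

-- ===== CLAIM (what is proved, stated in full; the proofs are below) =====
def Claim_unchanged_response_check_py : Prop := ∀ (act_a : String) (act_b : String) (processed_answer : List String), Dom_response_check_py act_a act_b processed_answer → Spec_response_check_py act_a act_b processed_answer (response_check_py act_a act_b processed_answer)
def Claim_changed_response_check_py : Prop := Dom_response_check_py (pvDiffWitness_response_check_py.1) (pvDiffWitness_response_check_py.2.1) (pvDiffWitness_response_check_py.2.2) ∧ D_response_check_py (pvDiffWitness_response_check_py.1) (pvDiffWitness_response_check_py.2.1) (pvDiffWitness_response_check_py.2.2) ∧ response_check_py (pvDiffWitness_response_check_py.1) (pvDiffWitness_response_check_py.2.1) (pvDiffWitness_response_check_py.2.2) = pvDiffWitnessOut_response_check_py.1 ∧ response_check_py_alt (pvDiffWitness_response_check_py.1) (pvDiffWitness_response_check_py.2.1) (pvDiffWitness_response_check_py.2.2) = pvDiffWitnessOut_response_check_py.2 ∧ pvDiffWitnessOut_response_check_py.1 ≠ pvDiffWitnessOut_response_check_py.2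
def Claim_exact_response_check_py : Prop := ∀ (act_a : String) (act_b : String) (processed_answer : List String), Dom_response_check_py act_a act_b processed_answer → D_response_check_py act_a act_b processed_answer → response_check_py act_a act_b processed_answer ≠ response_check_py_alt act_a act_b processed_answer

-- ===== LEMMAS AND PROOFS =====

-- B's scan never returns false if act_a does not occur
theorem respScan_of_not_mem (a b : String) (m : List String) (h : a ∉ m) :
    respScan a b m = true := by
  induction m with
  | nil => rfl
  | cons w ws ih =>
    simp only [List.mem_cons, not_or] at h
    rw [respScan]
    simp only [beq_iff_eq]
    rw [if_neg (fun he => h.1 he.symm)]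
    split
    · rfl
    · exact ih h.2

-- B's scan returns false if act_a occurs and act_b does not
theorem respScan_of_mem_not_mem (a b : String) (m : List String) (ha : a ∈ m) (hb : b ∉ m) :
    respScan a b m = false := by
  induction m with
  | nil => cases ha
  | cons w ws ih =>
    simp only [List.mem_cons, not_or] at hb
    rw [respScan]
    simp only [beq_iff_eq]
    rcases List.mem_cons.mp ha with h | h
    · rw [if_pos h.symm]
    · split
      · rfl
      · rw [if_neg (fun he => hb.1 he.symm)]
        exact ih h hb.2

-- B's scan decides on the first segment that mentions act_a or act_b
theorem respScan_append (a b : String) (xs ys : List String) :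
    respScan a b (xs ++ ys) =
      if xs.contains a || xs.contains b then respScan a b xs else respScan a b ys := by
  induction xs with
  | nil => simp
  | cons w ws ih =>
    by_cases hwa : w = a
    · subst hwa
      simp [respScan]
    · by_cases hwb : w = b
      · subst hwb
        simp [respScan, show (w == a) = false from by simp [hwa]]
      · simp only [List.cons_append, respScan, beq_iff_eq, if_neg hwa, if_neg hwb, ih,
          List.contains_eq_mem, Bool.or_eq_true, decide_eq_true_eq]
        have hiff : (a ∈ w :: ws ∨ b ∈ w :: ws) ↔ (a ∈ ws ∨ b ∈ ws) := by
          constructor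
          · rintro (h | h)
            · rcases List.mem_cons.mp h with h1 | h1
              · exact absurd h1.symm hwa
              · exact Or.inl h1
            · rcases List.mem_cons.mp h with h1 | h1
              · exact absurd h1.symm hwb
              · exact Or.inr h1
          · rintro (h | h)
            · exact Or.inl (List.mem_cons_of_mem _ h)
            · exact Or.inr (List.mem_cons_of_mem _ h)
        exact if_congr hiff.symm rfl rfl

-- with act_a = act_b the scan is just the (negated) membership test
theorem respScan_self (a : String) (m : List String) :
    respScan a a m = !m.contains a := by
  induction m with
  | nil => rfl
  | cons w ws ih =>
    rw [respScan]
    by_cases hw : w = a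
    · simp [hw]
    · have h1 : (w == a) = false := by simp [hw]
      simp [h1, ih]
      exact fun _ h => hw h.symm

-- decomposition of one iteration of A's loop at the first occurrence of act_a
theorem index?_decomp {a : String} {l : List String} {m : Nat}
    (hm : PySem.List.index? l a = some m) :
    ∃ suf, l.drop m = a :: suf ∧ l.drop (m + 1) = suf ∧ l.length = m + 1 + suf.length ∧
      l.getLast? = (a :: suf).getLast? := by
  obtain ⟨pre, suf, hl, hlen, -⟩ := (PySem.List.index?_eq_some_iff l a m).mp hm
  refine ⟨suf, ?_, ?_, ?_, ?_⟩
  · rw [hl, List.drop_append_of_le_length (by omega), ← hlen]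
    simp
  · have h2 : l = (pre ++ [a]) ++ suf := by simp [hl]
    rw [h2, show m + 1 = (pre ++ [a]).length from by simp [hlen], List.drop_left]
  · rw [hl]; simp; omega
  · rw [hl]; exact List.getLast?_append_of_ne_nil _ (by simp)

-- A's loop with act_a = act_b returns true exactly when the last element is not act_a
theorem respLoopA_self (a : String) : ∀ (n : Nat) (l : List String), l.length ≤ n →
    respLoopA a a l = decide (l.getLast? ≠ some a) := by
  intro n
  induction n with
  | zero =>
    intro l hlen0
    have h0 : l = [] := List.length_eq_zero_iff.mp (by omega)
    subst h0
    rw [respLoopA]; simp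
  | succ n ih =>
    intro l hl
    rw [respLoopA]
    by_cases hmem : a ∈ l
    · rw [if_pos (by simpa using hmem)]
      rw [if_neg (by simpa using hmem)]
      split
      · next heq => exact absurd ((PySem.List.index?_eq_none_iff l a).mp heq) (by simpa using hmem)
      · next m heq =>
        obtain ⟨suf, hdrop, hdrop1, hlen, hlast⟩ := index?_decomp heq
        cases suf with
        | nil =>
          rw [if_pos (by simp at hlen; omega)]
          rw [hlast]
          simp
        | cons w ws =>
          rw [if_neg (by simp at hlen; omega)]
          rw [PySem.List.slice_from_natCast, hdrop]
          rw [if_neg (by simp)]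
          rw [show ((m : Int) + 1) = (((m + 1 : Nat)) : Int) from by push_cast; ring,
              PySem.List.slice_from_natCast, hdrop1]
          rw [ih (w :: ws) (by simp at hlen ⊢; omega)]
          rw [hlast, List.getLast?_cons_cons]
    · rw [if_neg (by simpa using hmem)]
      have hne : l.getLast? ≠ some a := fun h => hmem (List.mem_of_getLast? h)
      simp [hne]

-- A's loop equals B's backward scan whenever act_a ≠ act_b
theorem respLoopA_ne (a b : String) (hab : a ≠ b) : ∀ (n : Nat) (l : List String),
    l.length ≤ n → respLoopA a b l = respScan a b l.reverse := by
  intro n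
  induction n with
  | zero =>
    intro l hlen0
    have h0 : l = [] := List.length_eq_zero_iff.mp (by omega)
    subst h0
    rw [respLoopA]; simp [respScan]
  | succ n ih =>
    intro l hl
    rw [respLoopA]
    by_cases hmem : a ∈ l
    · have hca : l.contains a = true := by simpa using hmem
      rw [if_pos hca]
      by_cases hbmem : b ∈ l
      · have hcb0 : ¬ ((!l.contains b) = true) := by simpa using hbmem
        rw [if_neg hcb0]
        split
        · next heq =>
            exact absurd ((PySem.List.index?_eq_none_iff l a).mp heq) (by simpa using hmem)
        · next m heq =>
          obtain ⟨suf, hdrop, hdrop1, hlen, -⟩ := index?_decomp heq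
          have hrev : l.reverse = suf.reverse ++ a :: (l.take m).reverse := by
            conv_lhs => rw [← List.take_append_drop m l, hdrop]
            simp
          rw [hrev, respScan_append]
          by_cases hsb : b ∈ suf
          · -- a B occurs after this A: both sides continue in suf
            cases suf with
            | nil => cases hsb
            | cons w ws =>
              have hc1 : ¬ (m = l.length - 1) := by simp at hlen; omega
              rw [if_neg hc1, PySem.List.slice_from_natCast, hdrop]
              have hcb : (a :: w :: ws).contains b = true := by
                have hb2 : b ∈ a :: w :: ws := List.mem_cons_of_mem _ hsb
                rw [List.contains_eq_mem]
                exact decide_eq_true hb2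
              have hc2 : ¬ ((!(a :: w :: ws).contains b) = true) := by rw [hcb]; decide
              rw [if_neg hc2]
              rw [show ((m : Int) + 1) = (((m + 1 : Nat)) : Int) from by push_cast; ring,
                  PySem.List.slice_from_natCast, hdrop1]
              rw [ih (w :: ws) (by simp at hlen ⊢; omega)]
              have hcond : ((w :: ws).reverse.contains a || (w :: ws).reverse.contains b)
                  = true := by
                simp only [List.contains_eq_mem, List.mem_reverse]
                simp [hsb]
              rw [if_pos hcond]
          · -- no B after this A: both sides are false
            have hscan :
                (if suf.reverse.contains a || suf.reverse.contains b then
                   respScan a b suf.reverse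
                 else respScan a b (a :: (l.take m).reverse)) = false := by
              by_cases hsa : a ∈ suf
              · have hc : (suf.reverse.contains a || suf.reverse.contains b) = true := by
                  simp only [List.contains_eq_mem, List.mem_reverse]
                  simp [hsa]
                rw [if_pos hc]
                exact respScan_of_mem_not_mem a b _ (by simpa using hsa) (by simpa using hsb)
              · have hc : ¬ ((suf.reverse.contains a || suf.reverse.contains b) = true) := by
                  simp only [List.contains_eq_mem, List.mem_reverse]
                  simp [hsa, hsb]
                rw [if_neg hc]
                rw [respScan]
                simp
            cases suf with
            | nil =>
              have hc1 : m = l.length - 1 := by simp at hlen; omega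
              rw [if_pos hc1, hscan]
            | cons w ws =>
              have hc1 : ¬ (m = l.length - 1) := by simp at hlen; omega
              rw [if_neg hc1, PySem.List.slice_from_natCast, hdrop]
              have hnb : b ∉ a :: w :: ws := by
                intro h
                rcases List.mem_cons.mp h with h1 | h1
                · exact hab h1.symm
                · exact hsb (by simpa using h1)
              have hc2 : (!(a :: w :: ws).contains b) = true := by
                simp [List.contains_eq_mem, hnb]
              rw [if_pos hc2, hscan]
      · have hcb0 : (!l.contains b) = true := by simpa using hbmem
        rw [if_pos hcb0]
        symm
        exact respScan_of_mem_not_mem a b _ (by simpa using hmem)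
          (by simpa using hbmem)
    · have hca : ¬ (l.contains a = true) := by simpa using hmem
      rw [if_neg hca]
      symm
      exact respScan_of_not_mem a b _ (by simpa using hmem)

-- ===== VERDICT (by name: the statement is the Claim_ definition above) =====
theorem response_check_py_spec : Claim_unchanged_response_check_py := by
  intro a b l _hdom hnD
  show response_check_py a b l = response_check_py_alt a b l
  unfold response_check_py response_check_py_alt
  by_cases hab : a = b
  · subst hab
    by_cases hmem : a ∈ l
    · have hlast : l.getLast? = some a := by
        by_contra h
        exact hnD ⟨rfl, hmem, h⟩
      rw [if_neg (by simpa using hmem)]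
      rw [if_neg (by simpa using hmem)]
      rw [respLoopA_self a l.length l le_rfl, respScan_self]
      simp [hlast, hmem]
    · rw [if_pos (by simpa using hmem), respScan_self]
      simp [hmem]
  · by_cases hmem : a ∈ l
    · by_cases hbmem : b ∈ l
      · rw [if_neg (by simpa using hmem)]
        rw [if_neg (by simp [hmem, hbmem])]
        exact respLoopA_ne a b hab l.length l le_rfl
      · rw [if_neg (by simpa using hmem)]
        rw [if_pos (by simp [hmem, hbmem])]
        symm
        exact respScan_of_mem_not_mem a b _ (by simpa using hmem) (by simpa using hbmem)
    · rw [if_pos (by simpa using hmem)]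
      symm
      exact respScan_of_not_mem a b _ (by simpa using hmem)

theorem response_check_py_changed : Claim_changed_response_check_py := by
  unfold Claim_changed_response_check_py
  refine ⟨by decide, by decide, ?_, by decide, by decide⟩
  show response_check_py "a" "a" ["a", "x"] = true
  unfold response_check_py
  rw [if_neg (by decide), if_neg (by decide)]
  rw [respLoopA_self "a" 2 ["a", "x"] (by simp)]
  decide

theorem response_check_py_tight : Claim_exact_response_check_py := by
  intro a b l _hdom hD
  obtain ⟨hab, hmem, hlast⟩ := hD
  subst hab
  unfold response_check_py response_check_py_alt
  rw [if_neg (by simpa using hmem)]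
  rw [if_neg (by simpa using hmem)]
  rw [respLoopA_self a l.length l le_rfl, respScan_self]
  simp [hlast, hmem]
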